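-- pv_equiv track=rewrite | github.com/Crschnicker/ScottODH | backend/middleware/cors.py | _is_origin_allowed
-- ===== SOURCE A (Python) =====
-- def _is_origin_allowed(origin, allowed_origins):
--     """
--     Check if an origin is allowed based on exact match or wildcard patterns
--     """
--     origin_lower = origin.lower()
--
--     for allowed in allowed_origins:
--         allowed_lower = allowed.lower()
--
--         # Exact match
--         if origin_lower == allowed_lower:
--             return True
--
--         # Wildcard match
--         if allowed_lower.startswith('https://*.'):
--             domain = allowed_lower[10:]  # Remove 'https://*.'
--             if origin_lower.endswith('.' + domain) or origin_lower == 'https://' + domain: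
--                 return True
--         elif allowed_lower.startswith('http://*.'):
--             domain = allowed_lower[9:]   # Remove 'http://*.'
--             if origin_lower.endswith('.' + domain) or origin_lower == 'http://' + domain:
--                 return True
--
--     return False
-- ===== SOURCE B (Python) =====
-- def _is_origin_allowed(origin, allowed_origins):
--     """
--     Check if an origin is allowed based on exact match or wildcard patterns
--     """
--     origin_lower = origin.lower()
--
--     exact = set()
--     wildcards = []
--     for allowed in allowed_origins:
--         a = allowed.lower()
--         exact.add(a)
--         if a.startswith('https://*.'):
--             wildcards.append(('https://', a[10:]))
--         elif a.startswith('http://*.'):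
--             wildcards.append(('http://', a[9:]))
--
--     if origin_lower in exact:
--         return True
--     return any(origin_lower.endswith('.' + d) or origin_lower == s + d
--                for s, d in wildcards)
-- ===== Notes on version B (the rewrite author's own statement) =====
-- stated objective: alternative
-- what changed: A's single interleaved scan with early return is replaced by an index-building pass (a set of lowercased exact origins plus a parsed list of (scheme, domain) wildcard entries) followed by one set-membership test and one any() over parsed wildcards; equivalence rests on the result being an order-independent existence check.
import Mathlib
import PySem

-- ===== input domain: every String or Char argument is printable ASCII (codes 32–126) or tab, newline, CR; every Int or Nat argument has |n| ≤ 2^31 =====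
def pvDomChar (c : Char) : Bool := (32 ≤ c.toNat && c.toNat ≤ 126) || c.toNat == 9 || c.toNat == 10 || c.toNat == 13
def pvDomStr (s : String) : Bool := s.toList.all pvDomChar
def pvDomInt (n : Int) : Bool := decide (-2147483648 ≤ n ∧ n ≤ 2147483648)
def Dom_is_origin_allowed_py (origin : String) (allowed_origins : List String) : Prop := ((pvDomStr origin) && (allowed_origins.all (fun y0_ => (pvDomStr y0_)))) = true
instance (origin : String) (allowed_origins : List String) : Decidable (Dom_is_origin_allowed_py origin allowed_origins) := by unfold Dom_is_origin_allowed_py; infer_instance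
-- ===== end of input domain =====

-- B replaces A's single interleaved scan (early return) by an index-building pass — an exact-match
-- set plus a parsed (scheme, domain) wildcard list — followed by a membership test and one any().

-- ===== PORT A =====
-- the 'for allowed in allowed_origins' loop with its early returns
def pvAloop (ol : List Char) : List String → Bool
  | [] => false
  | allowed :: rest =>
    let al := PySem.Chars.lower allowed.toList
    if ol == al then true
    else if PySem.Chars.startswith al "https://*.".toList then
      let domain := PySem.Chars.slice al (some 10) none
      if PySem.Chars.endswith ol ('.' :: domain) || ol == "https://".toList ++ domain then true
      else pvAloop ol rest
    else if PySem.Chars.startswith al "http://*.".toList then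
      let domain := PySem.Chars.slice al (some 9) none
      if PySem.Chars.endswith ol ('.' :: domain) || ol == "http://".toList ++ domain then true
      else pvAloop ol rest
    else pvAloop ol rest

def is_origin_allowed_py (origin : String) (allowed_origins : List String) : Bool :=
  pvAloop (PySem.Chars.lower origin.toList) allowed_origins

-- ===== PORT B =====
-- the body of B's index-building loop: add the lowered entry to the exact set,
-- and append its parsed (scheme, domain) pair to the wildcard list when it is a wildcard pattern
def pvBstep (st : PySem.Set (List Char) × List (List Char × List Char)) (allowed : String) :
    PySem.Set (List Char) × List (List Char × List Char) :=
  let a := PySem.Chars.lower allowed.toList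
  let ex := PySem.Set.add st.1 a
  let ws :=
    if PySem.Chars.startswith a "https://*.".toList then
      st.2 ++ [("https://".toList, PySem.Chars.slice a (some 10) none)]
    else if PySem.Chars.startswith a "http://*.".toList then
      st.2 ++ [("http://".toList, PySem.Chars.slice a (some 9) none)]
    else st.2
  (ex, ws)

def is_origin_allowed_py_alt (origin : String) (allowed_origins : List String) : Bool :=
  let ol := PySem.Chars.lower origin.toList
  let st := allowed_origins.foldl pvBstep (PySem.Set.empty, [])
  if PySem.Set.contains st.1 ol then true
  else st.2.any (fun p => PySem.Chars.endswith ol ('.' :: p.2) || ol == p.1 ++ p.2)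

-- ===== PRECONDITION & SPEC =====
def Spec_is_origin_allowed_py (origin : String) (allowed_origins : List String) (out : Bool) : Prop := out = is_origin_allowed_py_alt origin allowed_origins
instance (origin : String) (allowed_origins : List String) (out : Bool) : Decidable (Spec_is_origin_allowed_py origin allowed_origins out) := by unfold Spec_is_origin_allowed_py; infer_instance

-- ===== CLAIM (what is proved, stated in full; the proofs are below) =====
def Claim_equal_is_origin_allowed_py : Prop := ∀ (origin : String) (allowed_origins : List String), Dom_is_origin_allowed_py origin allowed_origins → Spec_is_origin_allowed_py origin allowed_origins (is_origin_allowed_py origin allowed_origins)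

-- ===== LEMMAS AND PROOFS =====

-- the per-entry predicate both programs existentially quantify
def pvPred (ol : List Char) (allowed : String) : Bool :=
  let al := PySem.Chars.lower allowed.toList
  (ol == al) ||
  (PySem.Chars.startswith al "https://*.".toList &&
    (PySem.Chars.endswith ol ('.' :: PySem.Chars.slice al (some 10) none) ||
     ol == "https://".toList ++ PySem.Chars.slice al (some 10) none)) ||
  (!PySem.Chars.startswith al "https://*.".toList &&
   PySem.Chars.startswith al "http://*.".toList &&
    (PySem.Chars.endswith ol ('.' :: PySem.Chars.slice al (some 9) none) ||
     ol == "http://".toList ++ PySem.Chars.slice al (some 9) none))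

-- the parsed wildcard entries one allowed-list element contributes
def pvWild (allowed : String) : List (List Char × List Char) :=
  let al := PySem.Chars.lower allowed.toList
  if PySem.Chars.startswith al "https://*.".toList then
    [("https://".toList, PySem.Chars.slice al (some 10) none)]
  else if PySem.Chars.startswith al "http://*.".toList then
    [("http://".toList, PySem.Chars.slice al (some 9) none)]
  else []

theorem pvAloop_eq_any (ol : List Char) (L : List String) :
    pvAloop ol L = L.any (pvPred ol) := by
  induction L with
  | nil => rfl
  | cons a rest ih =>
    simp only [pvAloop, List.any_cons, pvPred]
    split_ifs with h1 h2 h3 h4 h5 <;> simp_all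

theorem pvBfold_fst (L : List String) (ex : PySem.Set (List Char))
    (ws : List (List Char × List Char)) :
    (L.foldl pvBstep (ex, ws)).1 =
      L.foldl (fun s a => PySem.Set.add s (PySem.Chars.lower a.toList)) ex := by
  induction L generalizing ex ws with
  | nil => rfl
  | cons a rest ih => simp only [List.foldl_cons, pvBstep]; exact ih _ _

theorem pvBfold_snd (L : List String) (ex : PySem.Set (List Char))
    (ws : List (List Char × List Char)) :
    (L.foldl pvBstep (ex, ws)).2 = ws ++ L.flatMap pvWild := by
  induction L generalizing ex ws with
  | nil => simp
  | cons a rest ih =>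
    simp only [List.foldl_cons, List.flatMap_cons, pvBstep, pvWild]
    rw [ih]
    split_ifs <;> simp

-- per element, B's exact-or-wildcard test agrees with A's per-entry condition
theorem pvPred_eq (ol : List Char) (a : String) :
    pvPred ol a =
      ((ol == PySem.Chars.lower a.toList) ||
       (pvWild a).any (fun p => PySem.Chars.endswith ol ('.' :: p.2) || ol == p.1 ++ p.2)) := by
  simp only [pvPred, pvWild]
  split_ifs <;> simp_all

-- ===== VERDICT (by name: the statement is the Claim_ definition above) =====
theorem is_origin_allowed_py_spec : Claim_equal_is_origin_allowed_py := by
  intro origin allowed_origins _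
  unfold Spec_is_origin_allowed_py is_origin_allowed_py is_origin_allowed_py_alt
  rw [pvAloop_eq_any]
  simp only [Bool.if_true_left, pvBfold_fst, pvBfold_snd, List.nil_append]
  rw [Bool.eq_iff_iff]
  simp only [Bool.or_eq_true, List.any_eq_true, PySem.Set.contains_iff,
    PySem.Set.mem_foldl_add, List.mem_flatMap, pvPred_eq, PySem.Set.empty,
    decide_eq_true_eq, List.mem_nil_iff, false_or]
  constructor
  · rintro ⟨a, ha, h | h⟩
    · exact Or.inl ⟨a, ha, by simpa using h⟩
    · rcases h with ⟨p, hp, hq⟩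
      exact Or.inr ⟨p, ⟨a, ha, hp⟩, hq⟩
  · rintro (h | ⟨p, ⟨a, ha, hp⟩, hq⟩)
    · rcases h with ⟨a, ha, hb⟩
      exact ⟨a, ha, Or.inl (by simp [hb])⟩
    · exact ⟨a, ha, Or.inr ⟨p, hp, hq⟩⟩
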